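-- pv_equiv track=rewrite | github.com/cotepractice/CodingTest-Solution | seoyeon/프로그래머스/알고리즘 고득점 Kit/해시/전화번호 목록.py | solution
-- ===== SOURCE A (Python) =====
-- def solution(phone_book):
--     phone_book.sort()
--     n = len(phone_book)
--     answer = True
--
--     dict = {}
--
--     for phone in phone_book:
--         dict[hash(phone)] = phone
--
--     for i in range(n-1):
--         for j in range(i+1,n):
--             if phone_book[i] in phone_book[j]:
--                 answer = False
--
--     return answer
-- ===== SOURCE B (Python) =====
-- def solution(phone_book):
--     # Same in-place sort side effect as A; single pass with a hash set of
--     # previously seen numbers, testing membership of each string's substrings.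
--     phone_book.sort()
--     seen = set()
--     ok = True
--     for y in phone_book:
--         subs = {y[i:j] for i in range(len(y) + 1) for j in range(i, len(y) + 1)}
--         if not seen.isdisjoint(subs):
--             ok = False
--         seen.add(y)
--     return ok
-- ===== Notes on version B (the rewrite author's own statement) =====
-- stated objective: faster
-- what changed: Replaced the O(n^2) nested pairwise substring scan over the sorted list with a single pass that keeps a hash set of previously seen numbers and intersects it with the set of all substrings of the current string.
import Mathlib
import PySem

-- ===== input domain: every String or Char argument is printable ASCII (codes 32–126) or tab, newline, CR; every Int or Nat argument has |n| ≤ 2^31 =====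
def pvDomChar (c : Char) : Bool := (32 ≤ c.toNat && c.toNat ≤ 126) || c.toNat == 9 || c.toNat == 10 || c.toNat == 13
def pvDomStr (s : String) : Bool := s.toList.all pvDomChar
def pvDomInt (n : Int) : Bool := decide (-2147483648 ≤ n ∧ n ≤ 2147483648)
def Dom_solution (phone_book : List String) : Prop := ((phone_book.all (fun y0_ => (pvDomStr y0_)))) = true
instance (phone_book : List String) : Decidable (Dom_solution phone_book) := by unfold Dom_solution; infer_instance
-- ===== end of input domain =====

-- B replaces A's nested pairwise substring scan by one pass with a hash set of seen strings
-- (objective: faster). Both A and B sort phone_book in place; the equivalence proved is about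
-- the RETURN value (both perform the same mutation).

-- ===== PORT A =====
-- (A's `dict[hash(phone)] = phone` loop is dead code — the dict is never read — and hash()
--  is not portable; it is omitted, everything else is transliterated.)
def solution (phone_book : List String) : Bool :=
  let pb := PySem.List.sorted phone_book (fun x => x) false
  let n : Int := pb.length
  (PySem.List.pyRange 0 (n - 1) 1).foldl (fun answer i =>
    (PySem.List.pyRange (i + 1) n 1).foldl (fun answer j =>
      if PySem.Str.isIn (PySem.List.pyGetD pb i "") (PySem.List.pyGetD pb j "")
      then false else answer) answer) true

-- ===== PORT B =====
-- {y[i:j] for i in range(len(y)+1) for j in range(i, len(y)+1)}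
def pySubstrings (y : String) : PySem.Set String :=
  PySem.Set.ofList ((PySem.List.pyRange 0 (PySem.Str.len y + 1) 1).flatMap (fun i =>
    (PySem.List.pyRange i (PySem.Str.len y + 1) 1).map (fun j =>
      PySem.Str.slice y (some i) (some j))))

def solution_alt (phone_book : List String) : Bool :=
  let pb := PySem.List.sorted phone_book (fun x => x) false
  (pb.foldl (fun (st : PySem.Set String × Bool) y =>
      (PySem.Set.add st.1 y,
       if PySem.Set.isdisjoint st.1 (pySubstrings y) then st.2 else false))
    (PySem.Set.empty, true)).2

-- ===== PRECONDITION & SPEC =====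
def Spec_solution (phone_book : List String) (out : Bool) : Prop := out = solution_alt phone_book
instance (phone_book : List String) (out : Bool) : Decidable (Spec_solution phone_book out) := by unfold Spec_solution; infer_instance

-- ===== CLAIM (what is proved, stated in full; the proofs are below) =====
def Claim_equal_solution : Prop := ∀ (phone_book : List String), Dom_solution phone_book → Spec_solution phone_book (solution phone_book)

-- ===== LEMMAS AND PROOFS =====

-- the common characterisation: some earlier element of L is a substring of L[j]
def BadAt (L : List String) : Prop :=
  ∃ j, j < L.length ∧ ∃ x ∈ L.take j, x.toList <:+: (L.getD j "").toList

-- a slice of y (with in-range natural bounds) is an infix, and every infix is such a slice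
lemma mem_pySubstrings (x y : String) :
    x ∈ pySubstrings y ↔ x.toList <:+: y.toList := by
  unfold pySubstrings
  rw [PySem.Set.mem_ofList]
  simp only [List.mem_flatMap, List.mem_map, PySem.List.mem_pyRange_one]
  constructor
  · rintro ⟨i, ⟨hi0, _⟩, j, ⟨hij, _⟩, rfl⟩
    rw [PySem.Str.toList_slice, PySem.Chars.slice_eq_listSlice,
      PySem.List.slice_toNat _ hi0 (le_trans hi0 hij)]
    exact (List.take_prefix _ _).isInfix.trans (List.drop_suffix _ _).isInfix
  · rintro ⟨s, t, hst⟩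
    refine ⟨(s.length : Int), ⟨by positivity, ?_⟩,
      (s.length : Int) + (x.toList.length : Int), ⟨by omega, ?_⟩, ?_⟩
    · have : s.length + x.toList.length ≤ y.toList.length := by
        rw [← hst]; simp
      have hlen : PySem.Str.len y = (y.toList.length : Int) := by
        simp [PySem.Str.len_eq,]
      omega
    · have : s.length + x.toList.length ≤ y.toList.length := by
        rw [← hst]; simp
      have hlen : PySem.Str.len y = (y.toList.length : Int) := by
        simp [PySem.Str.len_eq,]
      omega
    · have htl : (PySem.Str.slice y (some (s.length : Int))
          (some ((s.length : Int) + (x.toList.length : Int)))).toList = x.toList := by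
        rw [PySem.Str.toList_slice, PySem.Chars.slice_eq_listSlice,
          PySem.List.slice_natCast_add, ← hst]
        rw [List.append_assoc, List.drop_left, List.take_left]
      exact String.toList_inj.mp htl

-- loop shape of A's inner loop
lemma foldl_if_false {α : Type} (l : List α) (p : α → Bool) (b : Bool) :
    l.foldl (fun a x => if p x then false else a) b = (b && !(l.any p)) := by
  induction l generalizing b with
  | nil => simp
  | cons h t ih => simp only [List.foldl_cons, List.any_cons, ih]; cases hp : p h <;> simp

-- loop shape of A's outer loop
lemma foldl_and {α : Type} (l : List α) (c : α → Bool) (b : Bool) :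
    l.foldl (fun a x => a && c x) b = (b && l.all c) := by
  induction l generalizing b with
  | nil => simp
  | cons h t ih => simp only [List.foldl_cons, List.all_cons, ih]; cases b <;> simp

-- BadAt through integer index pairs, as A's loops see it
lemma badAt_iff_idx (L : List String) :
    BadAt L ↔ ∃ i j : Int, 0 ≤ i ∧ i + 1 ≤ j ∧ j < (L.length : Int) ∧
      PySem.Str.isIn (PySem.List.pyGetD L i "") (PySem.List.pyGetD L j "") = true := by
  constructor
  · rintro ⟨j, hj, x, hx, hinf⟩
    obtain ⟨m, hm, rfl⟩ := List.mem_take_iff_getElem.mp hx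
    refine ⟨(m : Int), (j : Int), by positivity, by omega, by exact_mod_cast hj, ?_⟩
    rw [PySem.List.pyGetD_natCast, PySem.List.pyGetD_natCast]
    rw [PySem.Str.isIn_eq, PySem.Chars.isIn_iff_infix]
    rwa [List.getD_eq_getElem _ _ (by omega)]
  · rintro ⟨i, j, hi0, hij, hjlt, hin⟩
    rw [PySem.Str.isIn_eq, PySem.Chars.isIn_iff_infix] at hin
    refine ⟨j.toNat, by omega, PySem.List.pyGetD L i "", ?_, ?_⟩
    · apply List.mem_take_iff_getElem.mpr
      refine ⟨i.toNat, by omega, ?_⟩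
      rw [PySem.List.pyGetD_eq_getElem _ _ hi0 (by omega)]
    · rwa [PySem.List.pyGetD_eq_getElem (i := j) L "" (by omega) (by omega),
        ← List.getD_eq_getElem _ _ (by omega)] at hin

lemma solution_char (phone_book : List String) :
    solution phone_book = true ↔ ¬ BadAt (PySem.List.sorted phone_book (fun x => x) false) := by
  unfold solution
  rw [badAt_iff_idx]
  simp only [foldl_if_false, foldl_and, Bool.true_and, List.all_eq_true,
    Bool.not_eq_eq_eq_not, Bool.not_true, List.any_eq_false, PySem.List.mem_pyRange_one]
  constructor
  · rintro hall ⟨i, j, hi0, hij, hjlt, hin⟩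
    exact absurd hin (by simpa using hall i ⟨hi0, by omega⟩ j ⟨by omega, hjlt⟩)
  · intro hno i hi j hj
    simp only [Bool.not_eq_true]
    by_contra h
    exact hno ⟨i, j, hi.1, by omega, by omega, by simpa using h⟩

-- invariant of B's single pass: seen holds the already-processed strings
lemma alt_loop (l : List String) (seen : PySem.Set String) (ok : Bool) :
    ((l.foldl (fun (st : PySem.Set String × Bool) y =>
        (PySem.Set.add st.1 y,
         if PySem.Set.isdisjoint st.1 (pySubstrings y) then st.2 else false))
      (seen, ok)).2 = true)
    ↔ (ok = true ∧ ∀ j, j < l.length → ∀ x, (x ∈ seen ∨ x ∈ l.take j) →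
        ¬ x.toList <:+: (l.getD j "").toList) := by
  induction l generalizing seen ok with
  | nil => simp
  | cons y t ih =>
    rw [List.foldl_cons, ih]
    have hdisj : (PySem.Set.isdisjoint seen (pySubstrings y) = true) ↔
        ∀ x ∈ seen, ¬ x.toList <:+: y.toList := by
      rw [PySem.Set.isdisjoint_iff]
      simp only [mem_pySubstrings]
    constructor
    · rintro ⟨hok', hall⟩
      have hc : PySem.Set.isdisjoint seen (pySubstrings y) = true := by
        by_contra h
        rw [Bool.not_eq_true] at h
        rw [h] at hok'; simp at hok'
      rw [hc, if_pos rfl] at hok'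
      refine ⟨hok', ?_⟩
      intro j hj x hx
      cases j with
      | zero =>
        simp only [List.take_zero, List.not_mem_nil, or_false] at hx
        simpa using (hdisj.mp hc) x hx
      | succ j' =>
        have hx' : x ∈ PySem.Set.add seen y ∨ x ∈ t.take j' := by
          rcases hx with hx | hx
          · exact Or.inl ((PySem.Set.mem_add _ _ _).mpr (Or.inl hx))
          · rcases List.mem_cons.mp (by simpa using hx) with hx | hx
            · exact Or.inl ((PySem.Set.mem_add _ _ _).mpr (Or.inr hx))
            · exact Or.inr hx
        simpa using hall j' (by simpa using hj) x hx'
    · rintro ⟨hok, hall⟩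
      have hc : PySem.Set.isdisjoint seen (pySubstrings y) = true := by
        apply hdisj.mpr
        intro x hx
        simpa using hall 0 (by simp) x (Or.inl hx)
      rw [hc, if_pos rfl]
      refine ⟨hok, ?_⟩
      intro j hj x hx
      have hx' : x ∈ seen ∨ x ∈ (y :: t).take (j + 1) := by
        rcases hx with hx | hx
        · rcases (PySem.Set.mem_add _ _ _).mp hx with hx | hx
          · exact Or.inl hx
          · subst hx; exact Or.inr (by simp)
        · exact Or.inr (by simpa using List.mem_cons_of_mem y hx)
      simpa using hall (j + 1) (by simpa using hj) x hx'

lemma solution_alt_char (phone_book : List String) :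
    solution_alt phone_book = true ↔ ¬ BadAt (PySem.List.sorted phone_book (fun x => x) false) := by
  unfold solution_alt
  rw [alt_loop]
  unfold BadAt
  constructor
  · rintro ⟨-, hall⟩ ⟨j, hj, x, hx, hinf⟩
    exact hall j hj x (Or.inr hx) hinf
  · intro hno
    refine ⟨rfl, ?_⟩
    intro j hj x hx hinf
    rcases hx with hx | hx
    · simp [PySem.Set.empty] at hx
    · exact hno ⟨j, hj, x, hx, hinf⟩

-- ===== VERDICT (by name: the statement is the Claim_ definition above) =====
theorem solution_spec : Claim_equal_solution := by
  intro pb _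
  unfold Spec_solution
  rw [Bool.eq_iff_iff, solution_char, solution_alt_char]
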